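-- pv_equiv track=rewrite | github.com/prateeksha9/wearable-navigation | tests/hardware/cam.py | smooth_state
-- ===== SOURCE A (Python) =====
-- def smooth_state(history, classes, min_count):
--     counts = {k: 0 for k in classes}
--     for v in history:
--         if v in counts:
--             counts[v] += 1
--     if not counts:
--         return ""
--     cls, cnt = max(counts.items(), key=lambda x: x[1])
--     return cls if cnt >= min_count else ""
-- ===== SOURCE B (Python) =====
-- def smooth_state(history, classes, min_count):
--     best, best_count = "", -1
--     for c in classes:
--         cnt = history.count(c)
--         if cnt > best_count:
--             best, best_count = c, cnt
--     return best if best_count >= min_count else ""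
-- ===== Notes on version B (the rewrite author's own statement) =====
-- stated objective: simpler
-- what changed: Replaces the dict count-table plus max(items, key=...) with a single running best loop over classes that recounts each class via history.count, updating only on strictly greater counts to keep the first-class tie-break.
import Mathlib
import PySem

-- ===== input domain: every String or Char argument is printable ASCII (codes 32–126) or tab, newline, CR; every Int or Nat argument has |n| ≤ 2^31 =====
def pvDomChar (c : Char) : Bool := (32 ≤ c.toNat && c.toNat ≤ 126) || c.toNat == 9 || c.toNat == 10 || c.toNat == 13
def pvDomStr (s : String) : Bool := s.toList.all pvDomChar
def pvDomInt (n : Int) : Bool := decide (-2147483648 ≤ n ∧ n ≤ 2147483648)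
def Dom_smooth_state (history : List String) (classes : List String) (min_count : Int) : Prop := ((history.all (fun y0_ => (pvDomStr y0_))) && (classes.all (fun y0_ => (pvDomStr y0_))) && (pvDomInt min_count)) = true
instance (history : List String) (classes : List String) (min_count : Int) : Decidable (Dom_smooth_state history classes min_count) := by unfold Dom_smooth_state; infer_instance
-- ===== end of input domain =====

-- B replaces A's dict count-table + max(items, key) with a running-best loop over classes
-- recounting each class with history.count (a simpler decomposition; not claimed faster).


-- ===== PORT A =====
def smooth_state (history : List String) (classes : List String) (min_count : Int) : String :=
  -- counts = {k: 0 for k in classes}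
  let counts := classes.foldl (fun d k => d.insert k (0 : Int)) PySem.Dict.empty
  -- for v in history: if v in counts: counts[v] += 1
  let counts := history.foldl (fun d v => if d.contains v then d.modify v 0 (· + 1) else d) counts
  -- if not counts: return ""
  if counts.size = 0 then ""
  else
    -- cls, cnt = max(counts.items(), key=lambda x: x[1])
    match PySem.List.max? counts.items (fun x => x.2) with
    | some (cls, cnt) => if cnt ≥ min_count then cls else ""
    | none => ""

-- ===== PORT B =====
def smooth_state_alt (history : List String) (classes : List String) (min_count : Int) : String :=
  -- best, best_count = "", -1; for c in classes: cnt = history.count(c); if cnt > best_count: update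
  let best := classes.foldl
    (fun (acc : String × Int) c =>
      let cnt : Int := (PySem.List.count history c : Int)
      if cnt > acc.2 then (c, cnt) else acc)
    ("", -1)
  -- return best if best_count >= min_count else ""
  if best.2 ≥ min_count then best.1 else ""

-- ===== PRECONDITION & SPEC =====
def Spec_smooth_state (history : List String) (classes : List String) (min_count : Int) (out : String) : Prop := out = smooth_state_alt history classes min_count
instance (history : List String) (classes : List String) (min_count : Int) (out : String) : Decidable (Spec_smooth_state history classes min_count out) := by unfold Spec_smooth_state; infer_instance

-- ===== CLAIM (what is proved, stated in full; the proofs are below) =====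
def Claim_equal_smooth_state : Prop := ∀ (history : List String) (classes : List String) (min_count : Int), Dom_smooth_state history classes min_count → Spec_smooth_state history classes min_count (smooth_state history classes min_count)

-- ===== LEMMAS AND PROOFS =====

-- first-occurrence dedup relative to a seen list (proof-only helper)
def ddp (seen : List String) : List String → List String
  | [] => []
  | c :: cs => if c ∈ seen then ddp seen cs else c :: ddp (c :: seen) cs

theorem ddp_congr (l : List String) (s₁ s₂ : List String)
    (h : ∀ x, x ∈ s₁ ↔ x ∈ s₂) : ddp s₁ l = ddp s₂ l := by
  induction l generalizing s₁ s₂ with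
  | nil => rfl
  | cons c cs ih =>
    simp only [ddp]
    by_cases hc : c ∈ s₁
    · rw [if_pos hc, if_pos ((h c).mp hc)]; exact ih s₁ s₂ h
    · rw [if_neg hc, if_neg (fun hx => hc ((h c).mpr hx))]
      exact congrArg (c :: ·) (ih _ _ (by intro x; simp [h x]))

theorem contains_mk_map (s : List String) (f0 : String → Int) (v : String) :
    (PySem.Dict.mk (s.map (fun c => (c, f0 c)))).contains v = decide (v ∈ s) := by
  simp [PySem.Dict.contains_mk, Function.comp_def, List.any_beq']

theorem keys_mk_map (s : List String) (f0 : String → Int) :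
    (PySem.Dict.mk (s.map (fun c => (c, f0 c)))).keys = s := by
  simp [PySem.Dict.keys, List.map_map, Function.comp_def]

-- the dict-comprehension fold: items are the fresh first occurrences, all mapped to 0
theorem foldl_insert_items (classes : List String) : ∀ (s : List String),
    (classes.foldl (fun d k => d.insert k (0 : Int))
      (PySem.Dict.mk (s.map (fun c => (c, (0 : Int)))))).items
    = (s ++ ddp s classes).map (fun c => (c, (0 : Int))) := by
  induction classes with
  | nil => intro s; simp [ddp]
  | cons k cl ih =>
    intro s
    simp only [List.foldl_cons, ddp]
    by_cases hk : k ∈ s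
    · have hc : (PySem.Dict.mk (s.map (fun c => (c, (0 : Int))))).contains k = true := by
        rw [contains_mk_map]; simp [hk]
      have heq : (PySem.Dict.mk (s.map (fun c => (c, (0 : Int))))).insert k (0 : Int)
          = PySem.Dict.mk (s.map (fun c => (c, (0 : Int)))) := by
        simp only [PySem.Dict.insert, hc, if_pos]
        congr 1
        simp only [List.map_map]
        apply List.map_congr_left
        intro c _
        by_cases h : c = k <;> simp [h]
      rw [heq, ih s, if_pos hk]
    · have hc : (PySem.Dict.mk (s.map (fun c => (c, (0 : Int))))).contains k = false := by
        rw [contains_mk_map]; simp [hk]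
      have heq : (PySem.Dict.mk (s.map (fun c => (c, (0 : Int))))).insert k (0 : Int)
          = PySem.Dict.mk ((s ++ [k]).map (fun c => (c, (0 : Int)))) := by
        simp [PySem.Dict.insert, hc]
      rw [heq, ih (s ++ [k]), if_neg hk]
      rw [ddp_congr cl (s ++ [k]) (k :: s) (by intro x; simp [or_comm])]
      simp

-- getD on a literal dict of mapped distinct keys
theorem getD_mk_map (s : List String) (f0 : String → Int) (hnd : s.Nodup)
    (v : String) (hv : v ∈ s) :
    (PySem.Dict.mk (s.map (fun c => (c, f0 c)))).getD v 0 = f0 v := by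
  apply PySem.Dict.getD_of_mem_items
  · exact List.mem_map_of_mem hv
  · rw [keys_mk_map]; exact hnd

-- the counting loop: each stored value grows by the key's count in history
theorem count_fold_items (history : List String) : ∀ (f0 : String → Int) (s : List String),
    s.Nodup →
    (history.foldl (fun d v => if d.contains v then d.modify v 0 (· + 1) else d)
      (PySem.Dict.mk (s.map (fun c => (c, f0 c))))).items
    = s.map (fun c => (c, f0 c + (List.count c history : Int))) := by
  induction history with
  | nil => intro f0 s _; simp
  | cons v hs ih =>
    intro f0 s hnd
    simp only [List.foldl_cons]
    by_cases hv : v ∈ s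
    · have hc : (PySem.Dict.mk (s.map (fun c => (c, f0 c)))).contains v = true := by
        rw [contains_mk_map]; simp [hv]
      rw [if_pos hc]
      have hmod : (PySem.Dict.mk (s.map (fun c => (c, f0 c)))).modify v 0 (· + 1)
          = PySem.Dict.mk (s.map (fun c => (c, if c = v then f0 c + 1 else f0 c))) := by
        simp only [PySem.Dict.modify, PySem.Dict.insert, hc, if_pos]
        rw [getD_mk_map s f0 hnd v hv]
        congr 1
        simp only [List.map_map]
        apply List.map_congr_left
        intro c _
        by_cases h : c = v <;> simp [h]
      rw [hmod, ih (fun c => if c = v then f0 c + 1 else f0 c) s hnd]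
      apply List.map_congr_left
      intro c _
      by_cases h : c = v
      · subst h
        simp
        omega
      · simp [h, List.count_cons]
        exact fun hh => h hh.symm
    · have hc : (PySem.Dict.mk (s.map (fun c => (c, f0 c)))).contains v = false := by
        rw [contains_mk_map]; simp [hv]
      rw [if_neg (by simp [hc]), ih f0 s hnd]
      apply List.map_congr_left
      intro c hcs
      have hne : ¬ (v = c) := fun h => hv (h ▸ hcs)
      simp [hne]

-- PySem.List.max? folds an Option accumulator; from `some a` it is the plain running max
theorem foldl_opt {α κ : Type} [LT κ] [DecidableLT κ] (key : α → κ) :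
    ∀ (t : List α) (a : α),
    List.foldl (fun acc y => match acc with
      | none => some y
      | some m => if key m < key y then some y else some m) (some a) t
    = some (t.foldl (fun m y => if key m < key y then y else m) a) := by
  intro t
  induction t with
  | nil => intro a; rfl
  | cons y ys ih =>
    intro a
    simp only [List.foldl_cons]
    by_cases h : key a < key y <;> simp [h, ih]

-- max? on a nonempty list is the running-max foldl from the head
theorem max?_cons_foldl {α κ : Type} [LT κ] [DecidableLT κ] (x : α) (t : List α) (key : α → κ) :
    PySem.List.max? (x :: t) key
      = some (t.foldl (fun m y => if key m < key y then y else m) x) := by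
  show List.foldl _ none (x :: t) = _
  rw [List.foldl_cons]
  exact foldl_opt key t x

-- duplicates never update the running best: fold over classes = fold over its dedup
theorem foldl_ddp (history : List String) : ∀ (l : List String) (acc : String × Int)
    (seen : List String), (∀ c ∈ seen, (List.count c history : Int) ≤ acc.2) →
    l.foldl (fun acc c => if (List.count c history : Int) > acc.2
        then (c, (List.count c history : Int)) else acc) acc
    = (ddp seen l).foldl (fun acc c => if (List.count c history : Int) > acc.2
        then (c, (List.count c history : Int)) else acc) acc := by
  intro l
  induction l with
  | nil => intro acc seen _; rfl
  | cons c cs ih =>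
    intro acc seen hseen
    simp only [ddp, List.foldl_cons]
    by_cases hc : c ∈ seen
    · rw [if_pos hc, if_neg (not_lt.mpr (hseen c hc))]
      exact ih acc seen hseen
    · rw [if_neg hc]
      simp only [List.foldl_cons]
      apply ih
      intro d hd
      rcases List.mem_cons.mp hd with h | h
      · subst h
        by_cases hgt : (List.count d history : Int) > acc.2
        · simp [hgt]
        · rw [if_neg hgt]; omega
      · have hd2 := hseen d h
        by_cases hgt : (List.count c history : Int) > acc.2
        · rw [if_pos hgt]
          show _ ≤ (List.count c history : Int)
          omega
        · rw [if_neg hgt]; exact hd2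

theorem ddp_nodup : ∀ (l seen : List String),
    (ddp seen l).Nodup ∧ ∀ c ∈ ddp seen l, c ∉ seen := by
  intro l
  induction l with
  | nil => intro seen; simp [ddp]
  | cons c cs ih =>
    intro seen
    simp only [ddp]
    by_cases hc : c ∈ seen
    · rw [if_pos hc]; exact ih seen
    · rw [if_neg hc]
      obtain ⟨hnd, hmem⟩ := ih (c :: seen)
      refine ⟨List.nodup_cons.mpr ⟨fun h => (hmem c h) (List.mem_cons_self), hnd⟩, ?_⟩
      intro d hd
      rcases List.mem_cons.mp hd with h | h
      · exact h ▸ hc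
      · exact fun hds => (hmem d h) (List.mem_cons_of_mem c hds)

-- ===== VERDICT (by name: the statement is the Claim_ definition above) =====
theorem smooth_state_spec : Claim_equal_smooth_state := by
  intro history classes min_count _
  show smooth_state history classes min_count = smooth_state_alt history classes min_count
  unfold smooth_state smooth_state_alt
  have h0 : (classes.foldl (fun d k => d.insert k (0 : Int)) PySem.Dict.empty)
      = PySem.Dict.mk ((ddp [] classes).map (fun c => (c, (0 : Int)))) := by
    have h := foldl_insert_items classes []
    cases hf : classes.foldl (fun d k => d.insert k (0 : Int)) PySem.Dict.empty with
    | mk it =>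
      have h2 : (PySem.Dict.mk (([] : List String).map (fun c => (c, (0 : Int)))))
          = PySem.Dict.empty := rfl
      rw [h2, hf] at h
      exact congrArg PySem.Dict.mk (by simpa using h)
  rw [h0]
  obtain ⟨hnd, -⟩ := ddp_nodup classes []
  have hitems : (history.foldl (fun d v => if d.contains v then d.modify v 0 (· + 1) else d)
      (PySem.Dict.mk ((ddp [] classes).map (fun c => (c, (0 : Int)))))).items
      = (ddp [] classes).map (fun c => (c, (List.count c history : Int))) := by
    have h1 := count_fold_items history (fun _ => (0 : Int)) (ddp [] classes) hnd
    rw [h1]; simp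
  cases hcl : classes with
  | nil =>
    rw [hcl] at hitems
    simp only [ddp, List.map_nil] at hitems ⊢
    rw [if_pos (by simp [PySem.Dict.size, hitems])]
    simp only [List.foldl_nil]
    split <;> rfl
  | cons c0 cs =>
    rw [hcl] at hitems hnd
    have hddp : ddp [] (c0 :: cs) = c0 :: ddp [c0] cs := by simp [ddp]
    rw [hddp] at hitems ⊢
    have hsz : ¬ (history.foldl (fun d v => if d.contains v then d.modify v 0 (· + 1) else d)
        (PySem.Dict.mk ((c0 :: ddp [c0] cs).map (fun c => (c, (0 : Int)))))).size = 0 := by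
      simp only [PySem.Dict.size, hitems]
      simp
    rw [if_neg hsz]
    have hitems' : (history.foldl (fun d v => if d.contains v then d.modify v 0 (· + 1) else d)
        (PySem.Dict.mk ((c0 :: ddp [c0] cs).map (fun c => (c, (0 : Int)))))).items
        = (c0, (List.count c0 history : Int)) ::
          (ddp [c0] cs).map (fun c => (c, (List.count c history : Int))) := by
      rw [hitems]; simp
    rw [hitems', max?_cons_foldl, List.foldl_map]
    -- the two step functions are definitionally the same
    have hstep : (fun (m : String × Int) c =>
        if (fun x : String × Int => x.2) m < (fun x : String × Int => x.2) (c, (List.count c history : Int))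
        then (c, (List.count c history : Int)) else m)
        = (fun (acc : String × Int) c =>
          if (List.count c history : Int) > acc.2 then (c, (List.count c history : Int)) else acc) := by
      funext m c; rfl
    rw [hstep]
    -- B side: the seed is absorbed by the head, duplicates drop out
    have hB : (c0 :: cs).foldl
        (fun (acc : String × Int) c =>
          let cnt : Int := (PySem.List.count history c : Int)
          if cnt > acc.2 then (c, cnt) else acc) ("", -1)
        = (ddp [c0] cs).foldl
          (fun (acc : String × Int) c =>
            if (List.count c history : Int) > acc.2 then (c, (List.count c history : Int)) else acc)
          (c0, (List.count c0 history : Int)) := by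
      have hstep2 : (fun (acc : String × Int) c =>
          let cnt : Int := (PySem.List.count history c : Int)
          if cnt > acc.2 then (c, cnt) else acc)
          = (fun (acc : String × Int) c =>
            if (List.count c history : Int) > acc.2 then (c, (List.count c history : Int)) else acc) := by
        funext acc c; rfl
      rw [hstep2]
      simp only [List.foldl_cons]
      rw [if_pos (by show (-1 : Int) < _; omega)]
      exact foldl_ddp history cs (c0, (List.count c0 history : Int)) [c0]
        (by intro d hd; simp at hd; subst hd; simp)
    rw [hB]
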